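-- pv_equiv track=rewrite | github.com/GONGSHUKAI/USPTO_LLM | Code/extract_api_outcome.py | check_invalid_answer
-- ===== SOURCE A (Python) =====
-- def check_invalid_answer(answer)->bool:
--     # Check the validity of output heterogeneous graph
--     # answer is a string in the form of ""R1.R2.R4>S1.E1.T1>M1\nM1.R3>E2.T2>P1""
--     # split it by '\n' to get each 'substep'
--     substeps = answer.split('\n')
--     for substep in substeps:
--         # If each step has more than 2 '>', it is invalid
--         if substep.count('>') != 2:
--             return False
--         # If any entity with R and M is not in front of the first '>', it is invalid
--         if 'R' in substep:
--             if substep.index('R') > substep.index('>'):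
--                 return False
--         if 'M' in substep:
--             if substep.index('M') > substep.index('>') and substep.index('M') < substep.rindex('>'):
--                 return False
--         if 'P' in substep:
--             if substep.index('P') < substep.rindex('>'):
--                 return False
--         # If any entity with S, E, T, C is not behind the second '>', it is invalid
--         if 'S' in substep:
--             if substep.index('S') < substep.index('>') or substep.index('S') > substep.rindex('>'):
--                 return False
--         if 'E' in substep:
--             if substep.index('E') < substep.index('>') or substep.index('E') > substep.rindex('>'):
--                 return False
--         if 'T' in substep:
--             if substep.index('T') < substep.index('>') or substep.index('T') > substep.rindex('>'):
--                 return False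
--         if 'C' in substep:
--             if substep.index('C') < substep.index('>') or substep.index('C') > substep.rindex('>'):
--                 return False
--     return True
-- ===== SOURCE B (Python) =====
-- RULES = {'R': (0,), 'M': (0, 2), 'P': (2,), 'S': (1,), 'E': (1,), 'T': (1,), 'C': (1,)}
--
-- def check_invalid_answer(answer) -> bool:
--     for substep in answer.split('\n'):
--         parts = substep.split('>')
--         if len(parts) != 3:
--             return False
--         for ch, allowed in RULES.items():
--             seg = next((i for i, part in enumerate(parts) if ch in part), None)
--             if seg is not None and seg not in allowed:
--                 return False
--     return True
-- ===== Notes on version B (the rewrite author's own statement) =====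
-- stated objective: simpler
-- what changed: Replaces A's per-letter index/rindex position comparisons against the two separator positions by splitting each substep at the separator into three segments and checking the first segment containing each label against a per-letter allowed-segment table.
import Mathlib
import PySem

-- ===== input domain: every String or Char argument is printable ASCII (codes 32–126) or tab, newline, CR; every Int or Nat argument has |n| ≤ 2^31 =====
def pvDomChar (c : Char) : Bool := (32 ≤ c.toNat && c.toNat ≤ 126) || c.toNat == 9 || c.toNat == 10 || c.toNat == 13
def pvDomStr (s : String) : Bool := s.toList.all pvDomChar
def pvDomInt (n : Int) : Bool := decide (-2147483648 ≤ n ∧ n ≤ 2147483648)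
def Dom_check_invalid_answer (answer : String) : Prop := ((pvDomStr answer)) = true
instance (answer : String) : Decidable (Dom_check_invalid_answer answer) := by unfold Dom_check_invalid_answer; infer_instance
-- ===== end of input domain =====

-- B replaces A's per-letter index/rindex comparisons by splitting each substep at '>' into
-- three segments and checking each label's first containing segment against a rule table (objective: simpler).

-- ===== PORT A =====
-- Python str.index is only reached under the matching 'in' / count guard, where it equals
-- PySem.Chars.find (resp. rindex = PySem.Chars.rfind) — exact on those inputs.
def pvSubA (cs : List Char) : Bool :=
  if PySem.Chars.count cs ['>'] ≠ 2 then false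
  else if PySem.Chars.isIn ['R'] cs && decide (PySem.Chars.find cs ['R'] > PySem.Chars.find cs ['>']) then false
  else if PySem.Chars.isIn ['M'] cs && (decide (PySem.Chars.find cs ['M'] > PySem.Chars.find cs ['>']) && decide (PySem.Chars.find cs ['M'] < PySem.Chars.rfind cs ['>'])) then false
  else if PySem.Chars.isIn ['P'] cs && decide (PySem.Chars.find cs ['P'] < PySem.Chars.rfind cs ['>']) then false
  else if PySem.Chars.isIn ['S'] cs && (decide (PySem.Chars.find cs ['S'] < PySem.Chars.find cs ['>']) || decide (PySem.Chars.find cs ['S'] > PySem.Chars.rfind cs ['>'])) then false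
  else if PySem.Chars.isIn ['E'] cs && (decide (PySem.Chars.find cs ['E'] < PySem.Chars.find cs ['>']) || decide (PySem.Chars.find cs ['E'] > PySem.Chars.rfind cs ['>'])) then false
  else if PySem.Chars.isIn ['T'] cs && (decide (PySem.Chars.find cs ['T'] < PySem.Chars.find cs ['>']) || decide (PySem.Chars.find cs ['T'] > PySem.Chars.rfind cs ['>'])) then false
  else if PySem.Chars.isIn ['C'] cs && (decide (PySem.Chars.find cs ['C'] < PySem.Chars.find cs ['>']) || decide (PySem.Chars.find cs ['C'] > PySem.Chars.rfind cs ['>'])) then false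
  else true

def pvLoopA : List (List Char) → Bool
  | [] => true
  | s :: rest => if pvSubA s = false then false else pvLoopA rest

def check_invalid_answer (answer : String) : Bool :=
  pvLoopA (PySem.Chars.splitOn answer.toList ['\n'])

-- ===== PORT B =====
def pvRules : List (Char × List Int) :=
  [('R', [0]), ('M', [0, 2]), ('P', [2]), ('S', [1]), ('E', [1]), ('T', [1]), ('C', [1])]

-- first index i (from enumerate) whose segment contains ch, as in Source B's next(...)
def pvSegOf (parts : List (List Char)) (ch : Char) : Option Int :=
  (List.find? (fun ip => PySem.Chars.isIn [ch] ip.2) (PySem.List.enumerate parts)).map Prod.fst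

def pvRuleOk (parts : List (List Char)) (ch : Char) (allowed : List Int) : Bool :=
  match pvSegOf parts ch with
  | none => true
  | some s => allowed.contains s

def pvSubB (cs : List Char) : Bool :=
  match PySem.Chars.splitOn cs ['>'] with
  | [p0, p1, p2] => pvRules.all (fun rule => pvRuleOk [p0, p1, p2] rule.1 rule.2)
  | _ => false

def check_invalid_answer_alt (answer : String) : Bool :=
  (PySem.Chars.splitOn answer.toList ['\n']).all pvSubB

-- ===== PRECONDITION & SPEC =====
def Spec_check_invalid_answer (answer : String) (out : Bool) : Prop := out = check_invalid_answer_alt answer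
instance (answer : String) (out : Bool) : Decidable (Spec_check_invalid_answer answer out) := by unfold Spec_check_invalid_answer; infer_instance

-- ===== CLAIM (what is proved, stated in full; the proofs are below) =====
def Claim_equal_check_invalid_answer : Prop := ∀ (answer : String), Dom_check_invalid_answer answer → Spec_check_invalid_answer answer (check_invalid_answer answer)

-- ===== LEMMAS AND PROOFS =====

lemma pv_singleton_prefix_drop (c : Char) (s : List Char) (i : Nat) :
    [c] <+: s.drop i ↔ s[i]? = some c := by
  rw [← List.head?_drop]
  cases h : s.drop i with
  | nil => simp
  | cons a t => simp [List.cons_prefix_cons, eq_comm]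

lemma pv_singleton_infix (c : Char) (s : List Char) : [c] <:+: s ↔ c ∈ s := by
  constructor
  · intro h; exact h.sublist.subset (List.mem_singleton_self c)
  · intro h
    obtain ⟨u, v, huv⟩ := List.append_of_mem h
    exact ⟨u, v, by simp [huv]⟩

lemma pv_isIn_char (c : Char) (s : List Char) :
    PySem.Chars.isIn [c] s = decide (c ∈ s) := by
  by_cases h : c ∈ s
  · simp [h, (PySem.Chars.isIn_iff_infix [c] s).2 ((pv_singleton_infix c s).2 h)]
  · simp [h, (PySem.Chars.isIn_eq_false_iff [c] s).2 (fun hin => h ((pv_singleton_infix c s).1 hin))]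

lemma pv_find_char {c : Char} {s : List Char} (h : c ∈ s) :
    ∃ k : Nat, PySem.Chars.find s [c] = (k : Int) ∧ s[k]? = some c ∧ ∀ i < k, s[i]? ≠ some c := by
  have h0 : 0 ≤ PySem.Chars.find s [c] :=
    (PySem.Chars.find_nonneg_iff s [c]).2 ((pv_singleton_infix c s).2 h)
  obtain ⟨h1, h2⟩ := PySem.Chars.find_spec h0
  refine ⟨(PySem.Chars.find s [c]).toNat, (Int.toNat_of_nonneg h0).symm, ?_, ?_⟩
  · exact (pv_singleton_prefix_drop c s _).1 h1
  · intro i hi hci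
    exact h2 i hi ((pv_singleton_prefix_drop c s i).2 hci)

lemma pv_rfind_go (s : List Char) (c : Char) (k : Nat) :
    ∀ j : Nat, k ≤ j → s[k]? = some c → (∀ i, k < i → s[i]? ≠ some c) →
      PySem.Chars.rfind.go s [c] j = (k : Int) := by
  intro j
  induction j with
  | zero =>
    intro hk hkc _
    have hk0 : k = 0 := Nat.le_zero.mp hk
    subst hk0
    have hp : [c].isPrefixOf s = true :=
      List.isPrefixOf_iff_prefix.2 ((pv_singleton_prefix_drop c s 0).2 (by simpa using hkc))
    rw [PySem.Chars.rfind.go]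
    simp [hp]
  | succ j ih =>
    intro hk hkc hlater
    rw [PySem.Chars.rfind.go]
    by_cases hp : s[j+1]? = some c
    · have hk1 : k = j + 1 := by
        rcases Nat.lt_or_ge k (j+1) with h | h
        · exact absurd hp (hlater (j+1) h)
        · omega
      have : [c].isPrefixOf (s.drop (j+1)) = true :=
        List.isPrefixOf_iff_prefix.2 ((pv_singleton_prefix_drop c s (j+1)).2 hp)
      simp [this, hk1]
    · have hnp : [c].isPrefixOf (s.drop (j+1)) = false := by
        rw [Bool.eq_false_iff]
        intro hcon
        exact hp ((pv_singleton_prefix_drop c s (j+1)).1 (List.isPrefixOf_iff_prefix.1 hcon))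
      have hk' : k ≤ j := by
        rcases Nat.lt_or_ge k (j+1) with h | h
        · omega
        · have : k = j + 1 := by omega
          subst this; exact absurd hkc hp
      simp [hnp]
      exact ih hk' hkc hlater

lemma pv_count_go (c : Char) :
    ∀ (l : List Char) (fuel : Nat), l.length ≤ fuel → ∀ acc : Nat,
      PySem.Chars.count.go [c] fuel l acc = acc + l.count c := by
  intro l
  induction l with
  | nil => intro fuel _ acc; cases fuel <;> simp [PySem.Chars.count.go]
  | cons x t ih =>
    intro fuel hf acc
    cases fuel with
    | zero => simp at hf
    | succ f =>
      have hf' : t.length ≤ f := by simpa using hf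
      by_cases hx : x = c
      · subst hx
        have hp : [x].isPrefixOf (x :: t) = true := by simp [List.isPrefixOf]
        rw [PySem.Chars.count.go]
        simp only [hp, if_true]
        rw [show List.drop [x].length (x :: t) = t from by simp]
        rw [ih f hf' (acc + 1), List.count_cons]
        simp
        omega
      · have hp : [c].isPrefixOf (x :: t) = false := by
          simp [List.isPrefixOf, Ne.symm hx]
        rw [PySem.Chars.count.go]
        simp only [hp, Bool.false_eq_true, if_false]
        rw [ih f hf' acc, List.count_cons]
        simp [hx]

lemma pv_count_char (c : Char) (s : List Char) :
    PySem.Chars.count s [c] = s.count c := by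
  rw [PySem.Chars.count]
  simp [pv_count_go c s s.length (le_refl _) 0]

-- B-side split characterization (proof-only recursion mirroring Python's str.split on one char)
def pvSplit (c : Char) : List Char → List (List Char)
  | [] => [[]]
  | x :: t =>
    if x = c then [] :: pvSplit c t
    else
      match pvSplit c t with
      | [] => [[x]]
      | p :: ps => (x :: p) :: ps

lemma pvSplit_ne_nil (c : Char) (l : List Char) : pvSplit c l ≠ [] := by
  cases l with
  | nil => simp [pvSplit]
  | cons x t =>
    by_cases hx : x = c
    · simp [pvSplit, hx]
    · simp only [pvSplit, hx, if_false]
      cases h : pvSplit c t <;> simp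

lemma pv_splitOn_go (c : Char) :
    ∀ (l : List Char) (fuel : Nat), l.length ≤ fuel → ∀ (cur : List Char) (acc : List (List Char)),
      PySem.Chars.splitOn.go [c] fuel l cur acc =
        acc.reverse ++ (match pvSplit c l with
          | [] => []
          | p :: ps => (cur.reverse ++ p) :: ps) := by
  intro l
  induction l with
  | nil =>
    intro fuel _ cur acc
    cases fuel <;> (rw [PySem.Chars.splitOn.go] <;> simp [pvSplit])
  | cons x t ih =>
    intro fuel hf cur acc
    cases fuel with
    | zero => simp at hf
    | succ f =>
      have hf' : t.length ≤ f := by simpa using hf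
      by_cases hx : x = c
      · have hp : [c].isPrefixOf (x :: t) = true := by simp [List.isPrefixOf, hx]
        rw [PySem.Chars.splitOn.go]
        simp only [hp, if_true]
        rw [show List.drop [c].length (x :: t) = t from by simp]
        rw [ih f hf' [] (cur.reverse :: acc)]
        cases h : pvSplit c t with
        | nil => exact absurd h (pvSplit_ne_nil c t)
        | cons p ps => simp [pvSplit, hx, h]
      · have hp : [c].isPrefixOf (x :: t) = false := by
          simp [List.isPrefixOf]; exact fun h => absurd h.symm hx
        rw [PySem.Chars.splitOn.go]
        simp only [hp, Bool.false_eq_true, if_false]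
        rw [ih f hf' (x :: cur) acc]
        cases h : pvSplit c t with
        | nil => exact absurd h (pvSplit_ne_nil c t)
        | cons p ps => simp [pvSplit, hx, h]

lemma pv_splitOn_char (c : Char) (s : List Char) :
    PySem.Chars.splitOn s [c] = pvSplit c s := by
  rw [PySem.Chars.splitOn]
  rw [pv_splitOn_go c s (s.length + 1) (by omega) [] []]
  cases h : pvSplit c s with
  | nil => exact absurd h (pvSplit_ne_nil c s)
  | cons p ps => simp

lemma pvSplit_not_mem {c : Char} {l : List Char} (h : c ∉ l) : pvSplit c l = [l] := by
  induction l with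
  | nil => rfl
  | cons x t ih =>
    have hx : ¬ (x = c) := fun hxc => h (by simp [hxc])
    have ht : c ∉ t := fun hmem => h (by simp [hmem])
    simp [pvSplit, hx, ih ht]

lemma pvSplit_append {c : Char} {l : List Char} (h : c ∉ l) (xs : List Char) :
    pvSplit c (l ++ xs) =
      match pvSplit c xs with
      | [] => []
      | p :: ps => (l ++ p) :: ps := by
  induction l with
  | nil =>
    cases h' : pvSplit c xs with
    | nil => exact absurd h' (pvSplit_ne_nil c xs)
    | cons p ps => simp [h']
  | cons x t ih =>
    have hx : ¬ (x = c) := fun hxc => h (by simp [hxc])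
    have ht : c ∉ t := fun hmem => h (by simp [hmem])
    cases h' : pvSplit c xs with
    | nil => exact absurd h' (pvSplit_ne_nil c xs)
    | cons p ps =>
      have := ih ht
      rw [h'] at this
      simp [pvSplit, hx, this]

lemma pvSplit_len (c : Char) (l : List Char) :
    (pvSplit c l).length = l.count c + 1 := by
  induction l with
  | nil => simp [pvSplit]
  | cons x t ih =>
    by_cases hx : x = c
    · simp [pvSplit, hx, ih]
    · cases h : pvSplit c t with
      | nil => exact absurd h (pvSplit_ne_nil c t)
      | cons p ps =>
        have ih' : ps.length + 1 = t.count c + 1 := by simpa [h] using ih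
        simp only [pvSplit]
        rw [if_neg hx]
        simp only [h, List.length_cons, List.count_cons]
        simp [hx]
        omega

lemma pv_first_occ {c : Char} {s : List Char} (h : c ∈ s) :
    ∃ a b, s = a ++ c :: b ∧ c ∉ a := by
  induction s with
  | nil => simp at h
  | cons x t ih =>
    by_cases hx : x = c
    · exact ⟨[], t, by simp [hx], by simp⟩
    · have hmem : c ∈ t := by
        rcases List.mem_cons.1 h with h' | h'
        · exact absurd h'.symm hx
        · exact h'
      obtain ⟨a, b, hab, hna⟩ := ih hmem
      refine ⟨x :: a, b, by simp [hab], ?_⟩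
      intro hc
      rcases List.mem_cons.1 hc with h' | h'
      · exact hx h'.symm
      · exact hna h'

lemma pv_count_two {c : Char} {s : List Char} (h : s.count c = 2) :
    ∃ l m r, s = l ++ c :: (m ++ c :: r) ∧ c ∉ l ∧ c ∉ m ∧ c ∉ r := by
  have h1 : c ∈ s := by rw [← List.count_pos_iff]; omega
  obtain ⟨l, b, rfl, hl⟩ := pv_first_occ h1
  have hb : b.count c = 1 := by
    rw [List.count_append, List.count_cons_self, List.count_eq_zero.2 hl] at h
    omega
  have h2 : c ∈ b := by rw [← List.count_pos_iff]; omega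
  obtain ⟨m, r, rfl, hm⟩ := pv_first_occ h2
  have hr : c ∉ r := by
    rw [List.count_append, List.count_cons_self, List.count_eq_zero.2 hm] at hb
    exact List.count_eq_zero.1 (by omega)
  exact ⟨l, m, r, rfl, hl, hm, hr⟩

-- getElem? over the decomposition l ++ g :: (m ++ g :: r)
lemma pv_get_i1 (g : Char) (l m r : List Char) :
    (l ++ g :: (m ++ g :: r))[l.length]? = some g := by
  rw [List.getElem?_append_right (le_refl _)]
  simp

lemma pv_get_left (g : Char) (l m r : List Char) {i : Nat} (h : i < l.length) :
    (l ++ g :: (m ++ g :: r))[i]? = l[i]? :=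
  List.getElem?_append_left h

lemma pv_get_mid (g : Char) (l m r : List Char) (j : Nat) :
    (l ++ g :: (m ++ g :: r))[l.length + 1 + j]? = (m ++ g :: r)[j]? := by
  rw [List.getElem?_append_right (by omega)]
  have : l.length + 1 + j - l.length = j + 1 := by omega
  rw [this]
  simp

lemma pv_get_i2 (g : Char) (l m r : List Char) :
    (l ++ g :: (m ++ g :: r))[l.length + 1 + m.length]? = some g := by
  rw [pv_get_mid]
  rw [List.getElem?_append_right (le_refl _)]
  simp

lemma pv_get_right (g : Char) (l m r : List Char) (j : Nat) :
    (l ++ g :: (m ++ g :: r))[l.length + 1 + m.length + 1 + j]? = r[j]? := by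
  rw [show l.length + 1 + m.length + 1 + j = l.length + 1 + (m.length + 1 + j) from by omega]
  rw [pv_get_mid]
  rw [List.getElem?_append_right (by omega)]
  have : m.length + 1 + j - m.length = j + 1 := by omega
  rw [this]
  simp

-- any position of the concatenation classified against the three segments
lemma pv_get_inv {g : Char} {l m r : List Char} {k : Nat} {c : Char}
    (hk : (l ++ g :: (m ++ g :: r))[k]? = some c) :
    (k < l.length ∧ c ∈ l) ∨
    (k = l.length ∧ c = g) ∨
    (l.length < k ∧ k < l.length + 1 + m.length ∧ c ∈ m) ∨
    (k = l.length + 1 + m.length ∧ c = g) ∨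
    (l.length + 1 + m.length < k ∧ c ∈ r) := by
  rcases Nat.lt_trichotomy k l.length with h | h | h
  · left
    rw [pv_get_left g l m r h] at hk
    exact ⟨h, List.mem_of_getElem? hk⟩
  · subst h
    rw [pv_get_i1] at hk
    exact Or.inr (Or.inl ⟨rfl, (Option.some.inj hk).symm⟩)
  · rcases Nat.lt_trichotomy k (l.length + 1 + m.length) with h2 | h2 | h2
    · right; right; left
      have hkeq : k = l.length + 1 + (k - l.length - 1) := by omega
      rw [hkeq, pv_get_mid] at hk
      rw [List.getElem?_append_left (by omega)] at hk
      exact ⟨h, h2, List.mem_of_getElem? hk⟩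
    · subst h2
      rw [pv_get_i2] at hk
      exact Or.inr (Or.inr (Or.inr (Or.inl ⟨rfl, (Option.some.inj hk).symm⟩)))
    · right; right; right; right
      have hkeq : k = l.length + 1 + m.length + 1 + (k - (l.length + 1 + m.length) - 1) := by omega
      rw [hkeq, pv_get_right] at hk
      exact ⟨h2, List.mem_of_getElem? hk⟩

lemma pv_find_sep {g : Char} {l : List Char} (m r : List Char) (hl : g ∉ l) :
    PySem.Chars.find (l ++ g :: (m ++ g :: r)) [g] = (l.length : Int) := by
  have hmem : g ∈ l ++ g :: (m ++ g :: r) := by simp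
  obtain ⟨k, hk, hkc, hmin⟩ := pv_find_char hmem
  have hk1 : ¬ (k < l.length) := by
    intro h
    rw [pv_get_left g l m r h] at hkc
    exact hl (List.mem_of_getElem? hkc)
  have hk2 : k ≤ l.length := by
    by_contra h
    exact hmin l.length (by omega) (pv_get_i1 g l m r)
  have : k = l.length := by omega
  rw [hk, this]

lemma pv_rfind_sep {g : Char} {m r : List Char} (l : List Char) (_hm : g ∉ m) (hr : g ∉ r) :
    PySem.Chars.rfind (l ++ g :: (m ++ g :: r)) [g] = ((l.length + 1 + m.length : Nat) : Int) := by
  rw [PySem.Chars.rfind]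
  apply pv_rfind_go
  · simp; omega
  · exact pv_get_i2 g l m r
  · intro i hi hcon
    rcases pv_get_inv hcon with ⟨h', _⟩ | ⟨h', _⟩ | ⟨_, h', _⟩ | ⟨h', _⟩ | ⟨_, hmem⟩
    · omega
    · omega
    · omega
    · omega
    · exact hr hmem

lemma pv_seg_classify {g c : Char} (hc : c ≠ g) {l m r : List Char} :
    (c ∉ l ∧ c ∉ m ∧ c ∉ r ∧ PySem.Chars.isIn [c] (l ++ g :: (m ++ g :: r)) = false)
    ∨ (c ∈ l ∧ PySem.Chars.isIn [c] (l ++ g :: (m ++ g :: r)) = true ∧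
        PySem.Chars.find (l ++ g :: (m ++ g :: r)) [c] < (l.length : Int))
    ∨ (c ∉ l ∧ c ∈ m ∧ PySem.Chars.isIn [c] (l ++ g :: (m ++ g :: r)) = true ∧
        (l.length : Int) < PySem.Chars.find (l ++ g :: (m ++ g :: r)) [c] ∧
        PySem.Chars.find (l ++ g :: (m ++ g :: r)) [c] < ((l.length + 1 + m.length : Nat) : Int))
    ∨ (c ∉ l ∧ c ∉ m ∧ c ∈ r ∧ PySem.Chars.isIn [c] (l ++ g :: (m ++ g :: r)) = true ∧
        ((l.length + 1 + m.length : Nat) : Int) < PySem.Chars.find (l ++ g :: (m ++ g :: r)) [c]) := by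
  by_cases h1 : c ∈ l
  · right; left
    have hmem : c ∈ l ++ g :: (m ++ g :: r) := by simp [h1]
    obtain ⟨k, hk, hkc, hmin⟩ := pv_find_char hmem
    obtain ⟨j, hj, hje⟩ := List.mem_iff_getElem.1 h1
    have hcsj : (l ++ g :: (m ++ g :: r))[j]? = some c := by
      rw [pv_get_left g l m r hj, List.getElem?_eq_getElem hj, hje]
    have hkj : k ≤ j := by
      by_contra h
      exact hmin j (by omega) hcsj
    refine ⟨h1, by rw [pv_isIn_char]; exact decide_eq_true hmem, ?_⟩
    rw [hk]
    exact_mod_cast lt_of_le_of_lt hkj hj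
  · by_cases h2 : c ∈ m
    · right; right; left
      have hmem : c ∈ l ++ g :: (m ++ g :: r) := by simp [h2]
      obtain ⟨k, hk, hkc, hmin⟩ := pv_find_char hmem
      obtain ⟨j, hj, hje⟩ := List.mem_iff_getElem.1 h2
      have hcsj : (l ++ g :: (m ++ g :: r))[l.length + 1 + j]? = some c := by
        rw [pv_get_mid, List.getElem?_append_left hj, List.getElem?_eq_getElem hj, hje]
      have hup : k ≤ l.length + 1 + j := by
        by_contra h
        exact hmin (l.length + 1 + j) (by omega) hcsj
      have hlow : l.length < k := by
        rcases pv_get_inv hkc with ⟨_, hmem'⟩ | ⟨_, hg⟩ | ⟨hlt, _, _⟩ | ⟨_, hg⟩ | ⟨hlt, _⟩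
        · exact absurd hmem' h1
        · exact absurd hg hc
        · exact hlt
        · exact absurd hg hc
        · omega
      refine ⟨h1, h2, by rw [pv_isIn_char]; exact decide_eq_true hmem, ?_, ?_⟩
      · rw [hk]; exact_mod_cast hlow
      · rw [hk]; exact_mod_cast (by omega : k < l.length + 1 + m.length)
    · by_cases h3 : c ∈ r
      · right; right; right
        have hmem : c ∈ l ++ g :: (m ++ g :: r) := by simp [h3]
        obtain ⟨k, hk, hkc, hmin⟩ := pv_find_char hmem
        have hlow : l.length + 1 + m.length < k := by
          rcases pv_get_inv hkc with ⟨_, hmem'⟩ | ⟨_, hg⟩ | ⟨_, _, hmem'⟩ | ⟨_, hg⟩ | ⟨hlt, _⟩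
          · exact absurd hmem' h1
          · exact absurd hg hc
          · exact absurd hmem' h2
          · exact absurd hg hc
          · exact hlt
        refine ⟨h1, h2, h3, by rw [pv_isIn_char]; exact decide_eq_true hmem, ?_⟩
        rw [hk]; exact_mod_cast hlow
      · left
        refine ⟨h1, h2, h3, ?_⟩
        rw [pv_isIn_char]
        simp only [decide_eq_false_iff_not]
        intro hmem
        simp only [List.mem_append, List.mem_cons] at hmem
        rcases hmem with h | h | h | h | h
        · exact h1 h
        · exact hc h
        · exact h2 h
        · exact hc h
        · exact h3 h

lemma pv_segOf_eval (p0 p1 p2 : List Char) (ch : Char) :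
    pvSegOf [p0, p1, p2] ch =
      if ch ∈ p0 then some 0 else if ch ∈ p1 then some 1 else if ch ∈ p2 then some 2 else none := by
  by_cases h0 : ch ∈ p0 <;> by_cases h1 : ch ∈ p1 <;> by_cases h2 : ch ∈ p2 <;>
    simp [pvSegOf, PySem.List.enumerate, List.find?, pv_isIn_char, h0, h1, h2]

lemma pv_kind_R {g c : Char} (hc : c ≠ g) {l m r : List Char} (hl : g ∉ l) (_hm : g ∉ m) (_hr : g ∉ r) :
    (!(PySem.Chars.isIn [c] (l ++ g :: (m ++ g :: r)) &&
       decide (PySem.Chars.find (l ++ g :: (m ++ g :: r)) [c] > PySem.Chars.find (l ++ g :: (m ++ g :: r)) [g])))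
      = pvRuleOk [l, m, r] c [0] := by
  unfold pvRuleOk
  rw [pv_segOf_eval, pv_find_sep m r hl]
  rcases pv_seg_classify hc (l := l) (m := m) (r := r) with
    ⟨h1, h2, h3, hIn⟩ | ⟨h1, hIn, hf⟩ | ⟨h1, h2, hIn, hf1, hf2⟩ | ⟨h1, h2, h3, hIn, hf⟩
  · simp [hIn, h1, h2, h3]
  · have h' : ¬ ((l.length : Int) < PySem.Chars.find (l ++ g :: (m ++ g :: r)) [c]) := by omega
    simp [hIn, h1, h']
  · simp [hIn, h1, h2, hf1]
  · have h' : (l.length : Int) < PySem.Chars.find (l ++ g :: (m ++ g :: r)) [c] := by omega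
    simp [hIn, h1, h2, h3, h']

lemma pv_kind_M {g c : Char} (hc : c ≠ g) {l m r : List Char} (hl : g ∉ l) (hm : g ∉ m) (hr : g ∉ r) :
    (!(PySem.Chars.isIn [c] (l ++ g :: (m ++ g :: r)) &&
       (decide (PySem.Chars.find (l ++ g :: (m ++ g :: r)) [c] > PySem.Chars.find (l ++ g :: (m ++ g :: r)) [g]) &&
        decide (PySem.Chars.find (l ++ g :: (m ++ g :: r)) [c] < PySem.Chars.rfind (l ++ g :: (m ++ g :: r)) [g]))))
      = pvRuleOk [l, m, r] c [0, 2] := by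
  unfold pvRuleOk
  rw [pv_segOf_eval, pv_find_sep m r hl, pv_rfind_sep l hm hr]
  rcases pv_seg_classify hc (l := l) (m := m) (r := r) with
    ⟨h1, h2, h3, hIn⟩ | ⟨h1, hIn, hf⟩ | ⟨h1, h2, hIn, hf1, hf2⟩ | ⟨h1, h2, h3, hIn, hf⟩
  · simp [hIn, h1, h2, h3]
  · have h' : ¬ ((l.length : Int) < PySem.Chars.find (l ++ g :: (m ++ g :: r)) [c]) := by omega
    simp [hIn, h1, h']
  · simp [hIn, h1, h2, hf1]
    omega
  · simp [hIn, h1, h2, h3]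
    omega

lemma pv_kind_P {g c : Char} (hc : c ≠ g) {l m r : List Char} (_hl : g ∉ l) (hm : g ∉ m) (hr : g ∉ r) :
    (!(PySem.Chars.isIn [c] (l ++ g :: (m ++ g :: r)) &&
       decide (PySem.Chars.find (l ++ g :: (m ++ g :: r)) [c] < PySem.Chars.rfind (l ++ g :: (m ++ g :: r)) [g])))
      = pvRuleOk [l, m, r] c [2] := by
  unfold pvRuleOk
  rw [pv_segOf_eval, pv_rfind_sep l hm hr]
  rcases pv_seg_classify hc (l := l) (m := m) (r := r) with
    ⟨h1, h2, h3, hIn⟩ | ⟨h1, hIn, hf⟩ | ⟨h1, h2, hIn, hf1, hf2⟩ | ⟨h1, h2, h3, hIn, hf⟩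
  · simp [hIn, h1, h2, h3]
  · simp [hIn, h1]
    omega
  · simp [hIn, h1, h2]
    omega
  · simp [hIn, h1, h2, h3]
    omega

lemma pv_kind_SETC {g c : Char} (hc : c ≠ g) {l m r : List Char} (hl : g ∉ l) (hm : g ∉ m) (hr : g ∉ r) :
    (!(PySem.Chars.isIn [c] (l ++ g :: (m ++ g :: r)) &&
       (decide (PySem.Chars.find (l ++ g :: (m ++ g :: r)) [c] < PySem.Chars.find (l ++ g :: (m ++ g :: r)) [g]) ||
        decide (PySem.Chars.find (l ++ g :: (m ++ g :: r)) [c] > PySem.Chars.rfind (l ++ g :: (m ++ g :: r)) [g]))))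
      = pvRuleOk [l, m, r] c [1] := by
  unfold pvRuleOk
  rw [pv_segOf_eval, pv_find_sep m r hl, pv_rfind_sep l hm hr]
  rcases pv_seg_classify hc (l := l) (m := m) (r := r) with
    ⟨h1, h2, h3, hIn⟩ | ⟨h1, hIn, hf⟩ | ⟨h1, h2, hIn, hf1, hf2⟩ | ⟨h1, h2, h3, hIn, hf⟩
  · simp [hIn, h1, h2, h3]
  · simp [hIn, h1, hf]
  · simp [hIn, h1, h2]
    constructor
    · omega
    · omega
  · simp [hIn, h1, h2, h3]
    omega

lemma pv_if_false (b x : Bool) : (if b = true then false else x) = (!b && x) := by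
  cases b <;> simp

lemma pv_sub_eq (cs : List Char) : pvSubA cs = pvSubB cs := by
  by_cases hcount : cs.count '>' = 2
  · obtain ⟨l, m, r, rfl, hl, hm, hr⟩ := pv_count_two hcount
    have hsplit : PySem.Chars.splitOn (l ++ '>' :: (m ++ '>' :: r)) ['>'] = [l, m, r] := by
      rw [pv_splitOn_char, pvSplit_append hl,
          show pvSplit '>' ('>' :: (m ++ '>' :: r)) = [] :: pvSplit '>' (m ++ '>' :: r) from by
            simp [pvSplit],
          pvSplit_append hm,
          show pvSplit '>' ('>' :: r) = [] :: pvSplit '>' r from by simp [pvSplit],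
          pvSplit_not_mem hr]
      simp
    have hA : PySem.Chars.count (l ++ '>' :: (m ++ '>' :: r)) ['>'] = 2 := by
      rw [pv_count_char]; exact hcount
    simp only [pvSubA, pvSubB, hsplit, hA]
    rw [if_neg (by omega)]
    simp only [pvRules, List.all_cons, List.all_nil, Bool.and_true, pv_if_false]
    rw [pv_kind_R (show ('R' : Char) ≠ '>' from by decide) hl hm hr,
        pv_kind_M (show ('M' : Char) ≠ '>' from by decide) hl hm hr,
        pv_kind_P (show ('P' : Char) ≠ '>' from by decide) hl hm hr,
        pv_kind_SETC (show ('S' : Char) ≠ '>' from by decide) hl hm hr,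
        pv_kind_SETC (show ('E' : Char) ≠ '>' from by decide) hl hm hr,
        pv_kind_SETC (show ('T' : Char) ≠ '>' from by decide) hl hm hr,
        pv_kind_SETC (show ('C' : Char) ≠ '>' from by decide) hl hm hr]
  · have hA : pvSubA cs = false := by
      unfold pvSubA
      rw [if_pos (by rw [pv_count_char]; exact hcount)]
    have hlen : (PySem.Chars.splitOn cs ['>']).length ≠ 3 := by
      rw [pv_splitOn_char, pvSplit_len]
      omega
    rw [hA]
    rcases h : PySem.Chars.splitOn cs ['>'] with _ | ⟨a, _ | ⟨b, _ | ⟨c', _ | ⟨d, t⟩⟩⟩⟩ <;>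
      simp only [pvSubB, h] <;>
      first
        | rfl
        | (exact absurd (by rw [h]; rfl) hlen)

lemma pv_loopA_eq (xs : List (List Char)) : pvLoopA xs = xs.all pvSubB := by
  induction xs with
  | nil => rfl
  | cons x t ih =>
    simp only [pvLoopA, List.all_cons, ← ih, ← pv_sub_eq]
    cases pvSubA x <;> simp

-- ===== VERDICT (by name: the statement is the Claim_ definition above) =====
theorem check_invalid_answer_spec : Claim_equal_check_invalid_answer := by
  intro answer _
  unfold Spec_check_invalid_answer check_invalid_answer check_invalid_answer_alt
  exact pv_loopA_eq _
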